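-- pv_equiv track=rewrite | github.com/mujin0422/AIAgentNetworkConfig | src/tools/network_tools.py | parse_cdp_output
-- ===== SOURCE A (Python) =====
-- def parse_cdp_output(output: str) -> list:
--     """Parse output của lệnh show cdp neighbors detail"""
--     neighbors = []
--     lines = output.split('\n')
--     current = {}
--
--     for line in lines:
--         if 'Device ID:' in line:
--             if current:
--                 neighbors.append(current)
--             current = {}
--             current['device_id'] = line.split('Device ID:')[1].strip()
--         elif 'IP address:' in line:
--             current['ip_address'] = line.split('IP address:')[1].strip()
--         elif 'Platform:' in line:
--             current['platform'] = line.split('Platform:')[1].strip()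
--         elif 'Interface:' in line:
--             current['local_interface'] = line.split('Interface:')[1].strip()
--         elif 'Port ID (outgoing port):' in line:
--             current['remote_interface'] = line.split('Port ID (outgoing port):')[1].strip()
--
--     if current:
--         neighbors.append(current)
--
--     return neighbors
-- ===== SOURCE B (Python) =====
-- MARKERS = [
--     ('device_id', 'Device ID:'),
--     ('ip_address', 'IP address:'),
--     ('platform', 'Platform:'),
--     ('local_interface', 'Interface:'),
--     ('remote_interface', 'Port ID (outgoing port):'),
-- ]
--
--
-- def _classify(line):
--     for key, marker in MARKERS:
--         if marker in line:
--             return (key, line.split(marker)[1].strip())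
--     return None
--
--
-- def parse_cdp_output(output: str) -> list:
--     tokens = [t for t in map(_classify, output.split('\n')) if t is not None]
--     groups = []
--     for t in tokens:
--         if t[0] == 'device_id' or not groups:
--             groups.append([])
--         groups[-1].append(t)
--     return [dict(g) for g in groups]
-- ===== Notes on version B (the rewrite author's own statement) =====
-- stated objective: alternative
-- what changed: Replaces A's single streaming loop over one mutable current-dict with an explicit three-phase pipeline: classify every line against a priority-ordered marker table, group the resulting tokens at device_id markers, then build each group's dict at once.
import Mathlib
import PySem

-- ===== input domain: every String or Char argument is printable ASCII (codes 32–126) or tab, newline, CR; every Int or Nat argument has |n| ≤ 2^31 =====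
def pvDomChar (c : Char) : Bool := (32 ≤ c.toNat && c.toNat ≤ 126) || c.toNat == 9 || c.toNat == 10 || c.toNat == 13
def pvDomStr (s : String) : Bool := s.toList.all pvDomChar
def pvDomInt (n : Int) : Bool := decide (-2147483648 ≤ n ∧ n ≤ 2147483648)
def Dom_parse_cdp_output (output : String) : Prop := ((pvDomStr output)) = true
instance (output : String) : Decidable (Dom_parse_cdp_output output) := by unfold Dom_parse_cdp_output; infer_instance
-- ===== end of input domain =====

-- B re-implements A as an explicit three-phase pipeline (classify lines → group at device markers → build dicts)
-- instead of A's single streaming loop over one mutable dict; same return value, objective: alternative decomposition.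

-- ===== PORT A =====
-- A's loop body (the block inside `for line in lines`), named so the fold can cite it.
def pvStepA (st : List (PySem.Dict String String) × PySem.Dict String String) (line : String) :
    List (PySem.Dict String String) × PySem.Dict String String :=
  if PySem.Str.isIn "Device ID:" line then
    ((if st.2.items = [] then st.1 else st.1 ++ [st.2]),
      (PySem.Dict.empty).insert "device_id"
        (PySem.Str.strip ((PySem.List.pyGet? ((PySem.Str.split? line "Device ID:").getD []) 1).getD "")))
  else if PySem.Str.isIn "IP address:" line then
    (st.1, st.2.insert "ip_address"
        (PySem.Str.strip ((PySem.List.pyGet? ((PySem.Str.split? line "IP address:").getD []) 1).getD "")))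
  else if PySem.Str.isIn "Platform:" line then
    (st.1, st.2.insert "platform"
        (PySem.Str.strip ((PySem.List.pyGet? ((PySem.Str.split? line "Platform:").getD []) 1).getD "")))
  else if PySem.Str.isIn "Interface:" line then
    (st.1, st.2.insert "local_interface"
        (PySem.Str.strip ((PySem.List.pyGet? ((PySem.Str.split? line "Interface:").getD []) 1).getD "")))
  else if PySem.Str.isIn "Port ID (outgoing port):" line then
    (st.1, st.2.insert "remote_interface"
        (PySem.Str.strip ((PySem.List.pyGet? ((PySem.Str.split? line "Port ID (outgoing port):").getD []) 1).getD "")))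
  else st

def parse_cdp_output (output : String) : List (List (String × String)) :=
  let lines := (PySem.Str.split? output "\n").getD []
  let fin := lines.foldl pvStepA (([] : List (PySem.Dict String String)), (PySem.Dict.empty : PySem.Dict String String))
  (if fin.2.items = [] then fin.1 else fin.1 ++ [fin.2]).map (·.items)

-- ===== PORT B =====
def pvMarkers : List (String × String) :=
  [("device_id", "Device ID:"),
   ("ip_address", "IP address:"),
   ("platform", "Platform:"),
   ("local_interface", "Interface:"),
   ("remote_interface", "Port ID (outgoing port):")]

-- Source B's _classify: first marker (in priority order) contained in the line wins.
def pvClassify (line : String) : Option (String × String) :=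
  pvMarkers.findSome? (fun km =>
    if PySem.Str.isIn km.2 line then
      some (km.1, PySem.Str.strip ((PySem.List.pyGet? ((PySem.Str.split? line km.2).getD []) 1).getD ""))
    else none)

-- Source B's grouping loop body: a device token (or the very first token) opens a new group,
-- otherwise the token is appended to the last group.
def pvStepB (gs : List (List (String × String))) (t : String × String) :
    List (List (String × String)) :=
  if t.1 == "device_id" || gs.isEmpty then gs ++ [[t]]
  else gs.dropLast ++ [((PySem.List.pyGet? gs (-1)).getD []) ++ [t]]

-- dict(g)
def pvBuild (g : List (String × String)) : PySem.Dict String String :=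
  g.foldl (fun d kv => d.insert kv.1 kv.2) PySem.Dict.empty

def parse_cdp_output_alt (output : String) : List (List (String × String)) :=
  let tokens := ((PySem.Str.split? output "\n").getD []).filterMap pvClassify
  let groups := tokens.foldl pvStepB []
  groups.map (fun g => (pvBuild g).items)

-- ===== PRECONDITION & SPEC =====
def Spec_parse_cdp_output (output : String) (out : List (List (String × String))) : Prop := out = parse_cdp_output_alt output
instance (output : String) (out : List (List (String × String))) : Decidable (Spec_parse_cdp_output output out) := by unfold Spec_parse_cdp_output; infer_instance

-- ===== CLAIM (what is proved, stated in full; the proofs are below) =====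
def Claim_equal_parse_cdp_output : Prop := ∀ (output : String), Dom_parse_cdp_output output → Spec_parse_cdp_output output (parse_cdp_output output)

-- ===== LEMMAS AND PROOFS =====

-- grpNE g ts: the groups produced when a (nonempty) current group g is open and tokens ts remain.
def pvGrpNE (g : List (String × String)) : List (String × String) → List (List (String × String))
  | [] => [g]
  | t :: ts => if t.1 == "device_id" then g :: pvGrpNE [t] ts else pvGrpNE (g ++ [t]) ts

-- finish cur ts: the dicts A still emits from current dict `cur` and remaining tokens ts
-- (including the trailing `if current: neighbors.append(current)`).
def pvFinish (cur : PySem.Dict String String) : List (String × String) → List (PySem.Dict String String)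
  | [] => if cur.items = [] then [] else [cur]
  | t :: ts =>
    if t.1 == "device_id" then
      (if cur.items = [] then [] else [cur]) ++ pvFinish ((PySem.Dict.empty).insert t.1 t.2) ts
    else pvFinish (cur.insert t.1 t.2) ts

-- A's step, re-expressed through pvClassify.
theorem pvStepA_classify (st : List (PySem.Dict String String) × PySem.Dict String String) (line : String) :
    pvStepA st line =
      match pvClassify line with
      | none => st
      | some t =>
        if t.1 == "device_id" then
          ((if st.2.items = [] then st.1 else st.1 ++ [st.2]), (PySem.Dict.empty).insert t.1 t.2)
        else (st.1, st.2.insert t.1 t.2) := by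
  unfold pvStepA pvClassify pvMarkers
  simp only [List.findSome?]
  split_ifs <;> simp

-- inserting never empties a dict
theorem pvItems_insert_ne (d : PySem.Dict String String) (k v : String) :
    (d.insert k v).items ≠ [] := by
  rcases d with ⟨items⟩
  induction items with
  | nil => simp [PySem.Dict.insert]
  | cons hd tl ih =>
    simp only [PySem.Dict.items_insert]
    split <;> simp

theorem pvBuild_ne (g : List (String × String)) (h : g ≠ []) : (pvBuild g).items ≠ [] := by
  induction g using List.reverseRecOn with
  | nil => exact absurd rfl h
  | append_singleton g t _ =>
    simpa [pvBuild, List.foldl_append] using pvItems_insert_ne _ t.1 t.2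

theorem pvBuild_append (g : List (String × String)) (t : String × String) :
    pvBuild (g ++ [t]) = (pvBuild g).insert t.1 t.2 := by
  simp [pvBuild, List.foldl_append]

-- A's remaining run equals pvFinish on the classified tokens.
theorem pvA_run (lines : List String) :
    ∀ (ns : List (PySem.Dict String String)) (cur : PySem.Dict String String),
      (if (lines.foldl pvStepA (ns, cur)).2.items = [] then (lines.foldl pvStepA (ns, cur)).1
       else (lines.foldl pvStepA (ns, cur)).1 ++ [(lines.foldl pvStepA (ns, cur)).2]) =
      ns ++ pvFinish cur (lines.filterMap pvClassify) := by
  induction lines with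
  | nil =>
    intro ns cur
    simp only [List.foldl_nil, List.filterMap_nil, pvFinish]
    split <;> simp
  | cons line rest ih =>
    intro ns cur
    simp only [List.foldl_cons, List.filterMap_cons, pvStepA_classify]
    cases h : pvClassify line with
    | none => simpa using ih ns cur
    | some t =>
      by_cases hd : t.1 == "device_id"
      · simp only [hd, if_pos, pvFinish]
        rw [ih]
        split <;> simp
      · simp only [hd, Bool.false_eq_true, if_neg, not_false_iff, pvFinish]
        rw [ih]

-- B's grouping fold with a nonempty accumulator equals pvGrpNE on the open last group.
theorem pvB_grp (ts : List (String × String)) :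
    ∀ (gs : List (List (String × String))) (g : List (String × String)),
      ts.foldl pvStepB (gs ++ [g]) = gs ++ pvGrpNE g ts := by
  induction ts with
  | nil => intro gs g; simp [pvGrpNE]
  | cons t ts ih =>
    intro gs g
    by_cases hd : t.1 == "device_id"
    · have hstep : pvStepB (gs ++ [g]) t = (gs ++ [g]) ++ [[t]] := by simp [pvStepB, hd]
      simp only [List.foldl_cons, hstep, pvGrpNE, hd, if_pos]
      rw [ih (gs ++ [g]) [t]]
      simp
    · have hstep : pvStepB (gs ++ [g]) t = gs ++ [g ++ [t]] := by
        simp [pvStepB, hd, PySem.List.pyGet?, PySem.List.pyIdx?]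
      simp only [List.foldl_cons, hstep, pvGrpNE, hd, Bool.false_eq_true, if_neg, not_false_iff]
      rw [ih gs (g ++ [t])]

-- pvFinish from a built, nonempty group equals the built groups of pvGrpNE.
theorem pvFinish_build (ts : List (String × String)) :
    ∀ (g : List (String × String)), g ≠ [] →
      pvFinish (pvBuild g) ts = (pvGrpNE g ts).map pvBuild := by
  induction ts with
  | nil =>
    intro g hg
    simp [pvFinish, pvGrpNE, pvBuild_ne g hg]
  | cons t ts ih =>
    intro g hg
    by_cases hd : t.1 == "device_id"
    · have hb : (PySem.Dict.empty).insert t.1 t.2 = pvBuild [t] := by simp [pvBuild]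
      simp only [pvFinish, pvGrpNE, hd, if_pos, hb, List.map_cons, pvBuild_ne g hg]
      rw [ih [t] (by simp)]
      simp
    · simp only [pvFinish, pvGrpNE, hd, Bool.false_eq_true, if_neg, not_false_iff]
      rw [← pvBuild_append, ih (g ++ [t]) (by simp)]

-- the whole pipeline, compared at the dict-list level
theorem pvMain (L : List String) :
    (if (L.foldl pvStepA ([], PySem.Dict.empty)).2.items = [] then (L.foldl pvStepA ([], PySem.Dict.empty)).1
     else (L.foldl pvStepA ([], PySem.Dict.empty)).1 ++ [(L.foldl pvStepA ([], PySem.Dict.empty)).2]) =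
    ((L.filterMap pvClassify).foldl pvStepB []).map pvBuild := by
  rw [pvA_run L [] PySem.Dict.empty]
  cases h : L.filterMap pvClassify with
  | nil => simp [pvFinish, PySem.Dict.empty]
  | cons t ts =>
    have hb : (PySem.Dict.empty).insert t.1 t.2 = pvBuild [t] := by simp [pvBuild]
    have hstep : pvStepB [] t = [[t]] := by simp [pvStepB]
    have hfin : pvFinish PySem.Dict.empty (t :: ts) = pvFinish ((PySem.Dict.empty).insert t.1 t.2) ts := by
      by_cases hd : t.1 == "device_id" <;> simp [pvFinish, hd, PySem.Dict.empty]
    simp only [List.foldl_cons, hstep, List.nil_append]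
    rw [hfin, hb, pvFinish_build ts [t] (by simp),
        show ([[t]] : List (List (String × String))) = [] ++ [[t]] from rfl, pvB_grp ts [] [t],
        List.nil_append]

-- ===== VERDICT (by name: the statement is the Claim_ definition above) =====
theorem parse_cdp_output_spec : Claim_equal_parse_cdp_output := by
  intro output _
  show parse_cdp_output output = parse_cdp_output_alt output
  unfold parse_cdp_output parse_cdp_output_alt
  simp only []
  rw [show (fun g => (pvBuild g).items) = ((fun d : PySem.Dict String String => d.items) ∘ pvBuild) from rfl,
      ← List.map_map, ← pvMain]
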